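-- pv_equiv track=rewrite | github.com/taranggoyal70/ai-api-security-gateway | enterprise_gateway/agents/multi_agent_system.py | sanitize_inter_agent_message
-- ===== SOURCE A (Python) =====
-- def sanitize_inter_agent_message(message: str) -> str:
--     """
--     Sanitize messages between agents to prevent prompt injection.
--     Strips out suspicious instructions.
--     """
--     # Remove common prompt injection patterns
--     dangerous_patterns = [
--         "ignore previous instructions",
--         "disregard all",
--         "forget everything",
--         "you are now",
--         "new instructions",
--         "system:",
--         "assistant:"
--     ]
--
--     sanitized = message
--     for pattern in dangerous_patterns:
--         if pattern.lower() in sanitized.lower():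
--             # Replace with safe placeholder
--             sanitized = sanitized.replace(pattern, "[FILTERED]")
--
--     return sanitized
-- ===== SOURCE B (Python) =====
-- def sanitize_inter_agent_message(message: str) -> str:
--     """Single left-to-right scan replacing injection patterns, instead of
--     seven independent containment-check + replace passes."""
--     dangerous_patterns = [
--         "ignore previous instructions",
--         "disregard all",
--         "forget everything",
--         "you are now",
--         "new instructions",
--         "system:",
--         "assistant:",
--     ]
--     out = []
--     i = 0
--     n = len(message)
--     while i < n:
--         for p in dangerous_patterns:
--             if message.startswith(p, i):
--                 out.append("[FILTERED]")
--                 i += len(p)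
--                 break
--         else:
--             out.append(message[i])
--             i += 1
--     return "".join(out)
-- ===== Notes on version B (the rewrite author's own statement) =====
-- stated objective: alternative
-- what changed: Replaced the seven sequential lowercase-containment-check + str.replace passes (each building a new intermediate string) with one left-to-right scan of the message that emits [FILTERED] at each first-matching pattern occurrence; correctness relies on the proved fact that the patterns processed earlier never overlap from the right into later ones and [FILTERED] contains no pattern characters.
import Mathlib
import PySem

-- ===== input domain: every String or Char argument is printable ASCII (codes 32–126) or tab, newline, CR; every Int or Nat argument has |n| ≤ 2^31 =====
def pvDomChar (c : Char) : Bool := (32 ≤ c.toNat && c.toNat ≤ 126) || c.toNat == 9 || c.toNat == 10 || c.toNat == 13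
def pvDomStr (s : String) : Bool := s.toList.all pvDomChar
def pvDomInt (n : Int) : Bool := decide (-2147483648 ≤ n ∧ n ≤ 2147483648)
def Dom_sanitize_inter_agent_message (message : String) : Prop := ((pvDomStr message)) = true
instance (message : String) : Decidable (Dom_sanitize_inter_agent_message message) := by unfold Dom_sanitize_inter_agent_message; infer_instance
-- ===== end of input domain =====

-- B replaces A's seven sequential containment-check + replace passes by ONE left-to-right scan
-- emitting "[FILTERED]" at each first-matching pattern occurrence (objective: alternative, same value).

-- ===== PORT A =====
-- literal transliteration of Source A: guarded str.replace for each pattern in turn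
def sanitize_inter_agent_message (message : String) : String :=
  let dangerous_patterns : List String :=
    ["ignore previous instructions",
     "disregard all",
     "forget everything",
     "you are now",
     "new instructions",
     "system:",
     "assistant:"]
  let sanitized := message
  let sanitized := dangerous_patterns.foldl (fun sanitized pattern =>
    if PySem.Str.isIn (PySem.Str.lower pattern) (PySem.Str.lower sanitized) then
      PySem.Str.replace sanitized pattern "[FILTERED]"
    else sanitized) sanitized
  sanitized

-- ===== PORT B =====
-- the pattern list of Source B, as char lists (Source B scans the string character-wise)
def pvPatterns : List (List Char) :=
  ["ignore previous instructions".toList,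
   "disregard all".toList,
   "forget everything".toList,
   "you are now".toList,
   "new instructions".toList,
   "system:".toList,
   "assistant:".toList]

-- Source B's while-loop: at each position take the first pattern that starts here (the for/else),
-- emit "[FILTERED]" and skip it, otherwise copy the character; the emitted pieces are joined in order
def pvScan (pats : List (List Char)) : List Char → List Char
  | [] => []
  | c :: t =>
    match pats.find? (fun p => p.isPrefixOf (c :: t)) with
    | some p => "[FILTERED]".toList ++ pvScan pats (t.drop (p.length - 1))
    | none => c :: pvScan pats t
termination_by s => s.length
decreasing_by
  · simp only [List.length_drop, List.length_cons]; omega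
  · simp

def sanitize_inter_agent_message_alt (message : String) : String :=
  String.ofList (pvScan pvPatterns message.toList)

-- ===== PRECONDITION & SPEC =====
def Spec_sanitize_inter_agent_message (message : String) (out : String) : Prop := out = sanitize_inter_agent_message_alt message
instance (message : String) (out : String) : Decidable (Spec_sanitize_inter_agent_message message out) := by unfold Spec_sanitize_inter_agent_message; infer_instance

-- ===== CLAIM (what is proved, stated in full; the proofs are below) =====
def Claim_equal_sanitize_inter_agent_message : Prop := ∀ (message : String), Dom_sanitize_inter_agent_message message → Spec_sanitize_inter_agent_message message (sanitize_inter_agent_message message)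

-- ===== LEMMAS AND PROOFS =====

-- single-pattern left-to-right scan: the semantics of Python's str.replace(q, "[FILTERED]")
def pvScanOne (q : List Char) : List Char → List Char
  | [] => []
  | c :: t =>
    if q.isPrefixOf (c :: t) then "[FILTERED]".toList ++ pvScanOne q (t.drop (q.length - 1))
    else c :: pvScanOne q t
termination_by s => s.length
decreasing_by
  · simp only [List.length_drop, List.length_cons]; omega
  · simp

-- A's fold, on char lists, with the guards already discharged
def pvFold (s : List Char) : List Char := pvPatterns.foldl (fun s p => pvScanOne p s) s

-- "no occurrence of q can start inside a (and run on into whatever follows a)"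
def pvHcond (a q : List Char) : Bool :=
  a.tails.all (fun t => t.isEmpty || (!(List.isPrefixOf q t) && !(List.isPrefixOf t q)))

theorem pvScanOne_nil (q : List Char) : pvScanOne q [] = [] := by simp [pvScanOne]

theorem pvScanOne_cons (q c t) : pvScanOne q (c :: t) =
    (if q.isPrefixOf (c :: t) then "[FILTERED]".toList ++ pvScanOne q (t.drop (q.length - 1))
     else c :: pvScanOne q t) := by
  rw [pvScanOne]

theorem pv_not_prefix_append (q t r : List Char) (h1 : ¬ q <+: t) (h2 : ¬ t <+: q) :
    ¬ q <+: t ++ r := by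
  intro h
  rcases List.prefix_or_prefix_of_prefix h (List.prefix_append t r) with h' | h'
  · exact h1 h'
  · exact h2 h'

theorem pvHcond_suffix (a q : List Char) (h : pvHcond a q = true) (t : List Char)
    (ht : t <:+ a) (hne : t ≠ []) : ¬ q <+: t ∧ ¬ t <+: q := by
  have := List.all_eq_true.mp h t ((List.mem_tails t a).mpr ht)
  rcases hne' : t.isEmpty with _ | _
  · simp [hne'] at this
    exact ⟨by simp [← List.isPrefixOf_iff_prefix, this.1],
           by simp [← List.isPrefixOf_iff_prefix, this.2]⟩
  · simp [List.isEmpty_iff] at hne'; exact absurd hne' hne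

-- Lemma O: a scan passes over a block a that no occurrence can start inside
theorem pvScanOne_append (q a r : List Char) (h : pvHcond a q = true) :
    pvScanOne q (a ++ r) = a ++ pvScanOne q r := by
  induction a with
  | nil => simp
  | cons c a ih =>
    have h2 := pvHcond_suffix (c :: a) q h (c :: a) (List.suffix_refl _) (by simp)
    have hna : ¬ q <+: (c :: a) ++ r := pv_not_prefix_append _ _ _ h2.1 h2.2
    have hcond' : pvHcond a q = true := by
      simp only [pvHcond, List.all_eq_true] at h ⊢
      intro t ht
      exact h t ((List.mem_tails t (c :: a)).mpr
        (((List.mem_tails t a).mp ht).trans (List.suffix_cons c a)))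
    rw [List.cons_append, pvScanOne_cons]
    rw [if_neg (by simpa [List.isPrefixOf_iff_prefix] using hna)]
    simp [ih hcond']

-- Lemma P: scanning with p cannot create a new prefix occurrence of a '['-free pattern q
theorem pv_not_prefix_scanOne (p : List Char) : ∀ (s q : List Char), q ≠ [] → '[' ∉ q →
    ¬ q <+: s → ¬ q <+: pvScanOne p s := by
  intro s
  induction s with
  | nil => intro q hq _ h; simpa [pvScanOne_nil] using h
  | cons c t ih =>
    intro q hq hbr h
    rw [pvScanOne_cons]
    by_cases hpre : p.isPrefixOf (c :: t)
    · rw [if_pos hpre]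
      intro hcon
      rcases q with _ | ⟨d, q'⟩
      · exact hq rfl
      · rcases hcon with ⟨z, hz⟩
        rw [show "[FILTERED]".toList = '[' :: "FILTERED]".toList from rfl] at hz
        have hd : d = '[' := by
          have := congrArg (fun l => l.head?) hz
          simpa using this
        exact hbr (by simp [hd])
    · rw [if_neg hpre]
      intro hcon
      rcases q with _ | ⟨d, q'⟩
      · exact hq rfl
      · rcases List.cons_prefix_cons.mp hcon with ⟨rfl, h2⟩
        rcases q' with _ | ⟨e, q''⟩
        · exact h (List.cons_prefix_cons.mpr ⟨rfl, List.nil_prefix⟩)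
        · have hq' : ¬ (e :: q'') <+: t := fun hx => h (List.cons_prefix_cons.mpr ⟨rfl, hx⟩)
          exact ih (e :: q'') (by simp) (fun hx => hbr (by simp [hx])) hq' h2

-- a pattern with no occurrence at all scans to the string unchanged
theorem pvScanOne_of_not_infix (q s : List Char) (h : ¬ q <:+: s) :
    pvScanOne q s = s := by
  induction s with
  | nil => simp [pvScanOne_nil]
  | cons c t ih =>
    have h1 : ¬ q <+: (c :: t) := fun hx => h hx.isInfix
    have h2 : ¬ q <:+: t := fun hx => h (List.infix_cons hx)
    rw [pvScanOne_cons]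
    rw [if_neg (by simpa [List.isPrefixOf_iff_prefix] using h1), ih h2]

-- str.replace(q, "[FILTERED]") IS the single-pattern scan
theorem pv_replace_go_eq (q : List Char) (hq : q ≠ []) :
    ∀ fuel l acc, l.length ≤ fuel →
      PySem.Chars.replace.go q "[FILTERED]".toList fuel l acc = acc.reverse ++ pvScanOne q l := by
  intro fuel
  induction fuel with
  | zero =>
    intro l acc hl
    have : l = [] := List.eq_nil_of_length_eq_zero (by omega)
    subst this; simp [PySem.Chars.replace.go, pvScanOne_nil]
  | succ n ih =>
    intro l acc hl
    match l with
    | [] => simp [PySem.Chars.replace.go, pvScanOne_nil]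
    | c :: t =>
      rw [PySem.Chars.replace.go, pvScanOne_cons]
      by_cases hpre : q.isPrefixOf (c :: t)
      · rw [if_pos hpre, if_pos hpre]
        have hql : 1 ≤ q.length := by
          rcases q with _ | _
          · exact absurd rfl hq
          · simp
        have hdrop : List.drop q.length (c :: t) = t.drop (q.length - 1) := by
          rcases hq' : q.length with _ | m
          · omega
          · simp
        rw [hdrop, ih _ _ (by simp only [List.length_drop, List.length_cons] at *; omega)]
        simp
      · rw [if_neg hpre, if_neg hpre, ih _ _ (by simp at hl; omega)]
        simp

theorem pv_replace_eq_scanOne (q s : List Char) (hq : q ≠ []) :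
    PySem.Chars.replace s q "[FILTERED]".toList = pvScanOne q s := by
  rw [PySem.Chars.replace]
  rw [if_neg (by simp [List.isEmpty_iff, hq])]
  simpa using pv_replace_go_eq q hq s.length s [] le_rfl

-- one guarded replace step of A equals one scan, on char lists
theorem pv_stepA (p s : String) (hq : p.toList ≠ [])
    (hlow : PySem.Chars.lower p.toList = p.toList) :
    (if PySem.Str.isIn (PySem.Str.lower p) (PySem.Str.lower s) then
        PySem.Str.replace s p "[FILTERED]" else s).toList = pvScanOne p.toList s.toList := by
  by_cases hg : PySem.Str.isIn (PySem.Str.lower p) (PySem.Str.lower s) = true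
  · rw [if_pos hg]
    simpa using pv_replace_eq_scanOne p.toList s.toList hq
  · rw [if_neg hg]
    have hni : ¬ p.toList <:+: (PySem.Chars.lower s.toList) := by
      intro hx
      exact hg (by
        simp only [PySem.Str.isIn_eq, PySem.Str.toList_lower]
        rw [PySem.Chars.isIn_iff_infix, hlow]; exact hx)
    have hns : ¬ p.toList <:+: s.toList := by
      intro hx
      have hmap : PySem.Chars.lower p.toList <:+: PySem.Chars.lower s.toList :=
        hx.map PySem.Chars.lowerChar
      exact hni (hlow ▸ hmap)
    exact (pvScanOne_of_not_infix p.toList s.toList hns).symm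

-- A's whole fold, moved to char lists
theorem pv_A_toList (m : String) : (sanitize_inter_agent_message m).toList = pvFold m.toList := by
  unfold sanitize_inter_agent_message pvFold pvPatterns
  simp only [List.foldl]
  rw [pv_stepA, pv_stepA, pv_stepA, pv_stepA, pv_stepA, pv_stepA, pv_stepA] <;> decide

-- Lemma N: if no pattern in ps starts at the head, the whole fold copies the head
theorem pv_fold_cons (ps : List (List Char)) (c : Char) (t : List Char)
    (hgood : ∀ q ∈ ps, q ≠ [] ∧ '[' ∉ q)
    (hnp : ∀ q ∈ ps, ¬ q <+: (c :: t)) :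
    ps.foldl (fun s p => pvScanOne p s) (c :: t) = c :: ps.foldl (fun s p => pvScanOne p s) t := by
  induction ps generalizing t with
  | nil => simp
  | cons p ps ih =>
    have hp : ¬ p <+: (c :: t) := hnp p (by simp)
    simp only [List.foldl]
    rw [pvScanOne_cons]
    simp only [List.isPrefixOf_iff_prefix]
    rw [if_neg hp]
    exact ih (pvScanOne p t) (fun q hx => hgood q (by simp [hx]))
      (fun q hx => by
        have h1 := pv_not_prefix_scanOne p (c :: t) q (hgood q (by simp [hx])).1
          (hgood q (by simp [hx])).2 (hnp q (by simp [hx]))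
        rw [pvScanOne_cons] at h1
        simp only [List.isPrefixOf_iff_prefix] at h1
        rwa [if_neg hp] at h1)

-- C1: the fold passes over a block a inside which no pattern of ps can start
theorem pv_fold_append (ps : List (List Char)) (a r : List Char)
    (h : ∀ q ∈ ps, pvHcond a q = true) :
    ps.foldl (fun s p => pvScanOne p s) (a ++ r) = a ++ ps.foldl (fun s p => pvScanOne p s) r := by
  induction ps generalizing r with
  | nil => simp
  | cons p ps ih =>
    simp only [List.foldl]
    rw [pvScanOne_append p a r (h p (by simp))]
    exact ih (pvScanOne p r) (fun q hx => h q (by simp [hx]))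

-- the key replacement step: if pattern q (split position pre/post in the list) starts the string,
-- the whole fold emits "[FILTERED]" and continues on the rest
theorem pv_fold_match (pre post : List (List Char)) (q r : List Char) (hqne : q ≠ [])
    (hpre : ∀ p ∈ pre, pvHcond q p = true)
    (hpost : ∀ p ∈ post, pvHcond "[FILTERED]".toList p = true) :
    (pre ++ q :: post).foldl (fun s p => pvScanOne p s) (q ++ r) =
      "[FILTERED]".toList ++ (pre ++ q :: post).foldl (fun s p => pvScanOne p s) r := by
  rw [List.foldl_append, List.foldl_append]
  rw [pv_fold_append pre q r hpre]
  simp only [List.foldl]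
  have hstep : pvScanOne q (q ++ pre.foldl (fun s p => pvScanOne p s) r) =
      "[FILTERED]".toList ++ pvScanOne q (pre.foldl (fun s p => pvScanOne p s) r) := by
    rcases q with _ | ⟨c, t⟩
    · exact absurd rfl hqne
    · rw [List.cons_append, pvScanOne_cons]
      rw [if_pos (by simp [List.isPrefixOf_iff_prefix])]
      simp
  rw [hstep]
  rw [pv_fold_append post "[FILTERED]".toList _ hpost]

-- pv_fold_match instantiated at each of the 7 patterns (the side conditions are decided)
theorem pv_fold_match_mem (q : List Char) (hmem : q ∈ pvPatterns) (r : List Char) :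
    pvFold (q ++ r) = "[FILTERED]".toList ++ pvFold r := by
  unfold pvFold pvPatterns
  fin_cases hmem
  · exact pv_fold_match [] ["disregard all".toList, "forget everything".toList, "you are now".toList,
      "new instructions".toList, "system:".toList, "assistant:".toList]
      "ignore previous instructions".toList r (by decide) (by decide) (by decide)
  · exact pv_fold_match ["ignore previous instructions".toList] ["forget everything".toList,
      "you are now".toList, "new instructions".toList, "system:".toList, "assistant:".toList]
      "disregard all".toList r (by decide) (by decide) (by decide)
  · exact pv_fold_match ["ignore previous instructions".toList, "disregard all".toList]
      ["you are now".toList, "new instructions".toList, "system:".toList, "assistant:".toList]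
      "forget everything".toList r (by decide) (by decide) (by decide)
  · exact pv_fold_match ["ignore previous instructions".toList, "disregard all".toList,
      "forget everything".toList] ["new instructions".toList, "system:".toList, "assistant:".toList]
      "you are now".toList r (by decide) (by decide) (by decide)
  · exact pv_fold_match ["ignore previous instructions".toList, "disregard all".toList,
      "forget everything".toList, "you are now".toList] ["system:".toList, "assistant:".toList]
      "new instructions".toList r (by decide) (by decide) (by decide)
  · exact pv_fold_match ["ignore previous instructions".toList, "disregard all".toList,
      "forget everything".toList, "you are now".toList, "new instructions".toList]
      ["assistant:".toList] "system:".toList r (by decide) (by decide) (by decide)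
  · exact pv_fold_match ["ignore previous instructions".toList, "disregard all".toList,
      "forget everything".toList, "you are now".toList, "new instructions".toList,
      "system:".toList] [] "assistant:".toList r (by decide) (by decide) (by decide)

-- when the matched pattern starts the string, the fold emits "[FILTERED]" and continues
theorem pv_fold_step (p : List Char) (c : Char) (t : List Char) (hmem : p ∈ pvPatterns)
    (hpre : p <+: (c :: t)) :
    pvFold (c :: t) = "[FILTERED]".toList ++ pvFold (t.drop (p.length - 1)) := by
  have hlen1 : 1 ≤ p.length := by fin_cases hmem <;> decide
  have hs : p ++ (c :: t).drop p.length = c :: t := List.prefix_iff_eq_append.mp hpre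
  have hr : t.drop (p.length - 1) = (c :: t).drop p.length := by
    rcases hp : p.length with _ | n
    · omega
    · simp
  rw [hr]
  conv_lhs => rw [← hs]
  exact pv_fold_match_mem p hmem _

-- A's fold computes exactly B's single scan
theorem pv_main (s : List Char) : pvFold s = pvScan pvPatterns s := by
  induction s using pvScan.induct pvPatterns with
  | case1 =>
    simp [pvFold, pvPatterns, List.foldl, pvScanOne_nil, pvScan]
  | case2 c t p hfind ih =>
    rw [pvScan, hfind]
    show pvFold (c :: t) = "[FILTERED]".toList ++ pvScan pvPatterns (List.drop (p.length - 1) t)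
    rw [← ih]
    exact pv_fold_step p c t (List.mem_of_find?_eq_some hfind)
      (by simpa [List.isPrefixOf_iff_prefix] using List.find?_some hfind)
  | case3 c t hfind ih =>
    rw [pvScan, hfind]
    show pvFold (c :: t) = c :: pvScan pvPatterns t
    rw [← ih]
    exact pv_fold_cons pvPatterns c t (by decide)
      (fun q hq => by
        have := List.find?_eq_none.mp hfind q hq
        simpa [List.isPrefixOf_iff_prefix] using this)

theorem pv_B_toList (m : String) :
    (sanitize_inter_agent_message_alt m).toList = pvScan pvPatterns m.toList := by
  simp [sanitize_inter_agent_message_alt]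

-- ===== VERDICT (by name: the statement is the Claim_ definition above) =====
theorem sanitize_inter_agent_message_spec : Claim_equal_sanitize_inter_agent_message := by
  intro message _
  unfold Spec_sanitize_inter_agent_message
  apply String.toList_inj.mp
  rw [pv_A_toList, pv_B_toList, pv_main]
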